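-- pv_equiv track=rewrite | github.com/yfding98/EEG_SUAT | selected_segment_training/dataset_selected.py | parse_channel_names_from_filename
-- ===== SOURCE A (Python) =====
-- def parse_channel_names_from_filename(filename):
--     """
--     从_selected文件名中解析标记的异常通道
--
--     例如: SZ2_postICA_selected_T4_F8_Sph_R.set -> ['T4', 'F8', 'Sph-R']
--
--     参数:
--         filename: 文件名
--
--     返回:
--         channels: 通道名称列表
--     """
--     # 移除.set后缀
--     name = filename.replace('.set', '')
--
--     # 找到_selected_的位置
--     if '_selected_' not in name:
--         return []
--
--     # 提取_selected_之后的部分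
--     suffix = name.split('_selected_')[1]
--
--     # 按下划线分割得到通道名
--     parts = suffix.split('_')
--
--     channels = []
--     i = 0
--     while i < len(parts):
--         # 检查是否是 Sph/R 或 Sphe/L 这种模式
--         if i + 1 < len(parts) and parts[i] in ['Sph', 'Sphe'] and parts[i+1] in ['L', 'R']:
--             channels.append(f"{parts[i]}-{parts[i+1]}")
--             i += 2
--         else:
--             channels.append(parts[i])
--             i += 1
--
--     return channels
-- ===== SOURCE B (Python) =====
-- def parse_channel_names_from_filename(filename):
--     pieces = filename.replace('.set', '').split('_selected_')
--     if len(pieces) < 2: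
--         return []
--     out = []
--     for t in reversed(pieces[1].split('_')):
--         if t in ('Sph', 'Sphe') and out and out[-1] in ('L', 'R'):
--             out[-1] = f"{t}-{out[-1]}"
--         else:
--             out.append(t)
--     out.reverse()
--     return out
-- ===== Notes on version B (the rewrite author's own statement) =====
-- stated objective: alternative
-- what changed: B guards by the length of the '_selected_' split instead of a substring test plus indexed get, and replaces A's forward index-stepping while loop with i+1 lookahead by a reverse scan that builds the channel list back-to-front, merging an 'L'/'R' already at the tail into a preceding 'Sph'/'Sphe'.
import Mathlib
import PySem

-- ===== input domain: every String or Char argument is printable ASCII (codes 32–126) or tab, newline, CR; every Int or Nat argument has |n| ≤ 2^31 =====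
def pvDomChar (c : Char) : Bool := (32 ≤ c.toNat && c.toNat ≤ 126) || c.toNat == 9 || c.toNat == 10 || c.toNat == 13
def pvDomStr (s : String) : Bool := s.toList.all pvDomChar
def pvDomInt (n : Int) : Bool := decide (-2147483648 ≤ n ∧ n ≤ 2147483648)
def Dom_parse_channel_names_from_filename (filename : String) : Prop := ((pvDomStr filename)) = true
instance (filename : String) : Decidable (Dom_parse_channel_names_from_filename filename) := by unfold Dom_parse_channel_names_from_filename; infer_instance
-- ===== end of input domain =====

-- B guards by the length of the '_selected_' split (instead of a substring test plus indexed
-- get) and merges by a reverse scan building the channel list back-to-front (alternative).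

-- ===== PORT A =====
-- A's while loop over parts with index i: consumes two tokens when the Sph/Sphe + L/R pattern
-- matches (i += 2), otherwise one (i += 1).
def pvLoopA : List String → List String
  | [] => []
  | x :: rest =>
    match rest with
    | y :: rest' =>
      if (x = "Sph" ∨ x = "Sphe") ∧ (y = "L" ∨ y = "R") then
        (x ++ "-" ++ y) :: pvLoopA rest'
      else
        x :: pvLoopA (y :: rest')
    | [] => [x]

def parse_channel_names_from_filename (filename : String) : List String :=
  let name := PySem.Str.replace filename ".set" ""
  if PySem.Str.isIn "_selected_" name = false then []
  else
    -- split('_selected_')[1]: index 1 exists because '_selected_' occurs in name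
    let suffix := (PySem.List.pyGet? ((PySem.Str.split? name "_selected_").getD []) 1).getD ""
    pvLoopA ((PySem.Str.split? suffix "_").getD [])

-- ===== PORT B =====
-- B's for-loop over reversed(parts): out holds the result back-to-front; an 'L'/'R' sitting at
-- out's tail (= the token just to the right) is merged into a 'Sph'/'Sphe' being processed.
def pvRevLoopB (out : List String) : List String → List String
  | [] => out
  | t :: rest =>
    if (t = "Sph" ∨ t = "Sphe") ∧ out ≠ [] ∧
        (out.getLast? = some "L" ∨ out.getLast? = some "R") then
      pvRevLoopB (out.dropLast ++ [t ++ "-" ++ (out.getLast?.getD "")]) rest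
    else
      pvRevLoopB (out ++ [t]) rest

def parse_channel_names_from_filename_alt (filename : String) : List String :=
  match (PySem.Str.split? (PySem.Str.replace filename ".set" "") "_selected_").getD [] with
  | _ :: suffix :: _ =>
      (pvRevLoopB [] (((PySem.Str.split? suffix "_").getD []).reverse)).reverse
  | _ => []

-- ===== PRECONDITION & SPEC =====
def Spec_parse_channel_names_from_filename (filename : String) (out : List String) : Prop := out = parse_channel_names_from_filename_alt filename
instance (filename : String) (out : List String) : Decidable (Spec_parse_channel_names_from_filename filename out) := by unfold Spec_parse_channel_names_from_filename; infer_instance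

-- ===== CLAIM (what is proved, stated in full; the proofs are below) =====
def Claim_equal_parse_channel_names_from_filename : Prop := ∀ (filename : String), Dom_parse_channel_names_from_filename filename → Spec_parse_channel_names_from_filename filename (parse_channel_names_from_filename filename)

-- ===== LEMMAS AND PROOFS =====

-- Proof-only middle form: the right-fold merge (process tokens right to left, front-first).
def pvMergeR : List String → List String
  | [] => []
  | t :: rest =>
    if (t = "Sph" ∨ t = "Sphe") ∧
        ((pvMergeR rest).head? = some "L" ∨ (pvMergeR rest).head? = some "R") then
      (t ++ "-" ++ ((pvMergeR rest).head?.getD "")) :: (pvMergeR rest).tail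
    else
      t :: pvMergeR rest

theorem pvMergeR_cons_of_not_sph (t : String) (rest : List String)
    (h1 : t ≠ "Sph") (h2 : t ≠ "Sphe") : pvMergeR (t :: rest) = t :: pvMergeR rest := by
  rw [pvMergeR]
  exact if_neg (fun hc => hc.1.elim h1 h2)

-- Head characterisation: the first element of pvMergeR (y :: rest) is y itself or a merged pair.
theorem pvMergeR_head? (y : String) (rest : List String) :
    (pvMergeR (y :: rest)).head? = some y ∨
      (∃ z, (y = "Sph" ∨ y = "Sphe") ∧ (z = "L" ∨ z = "R") ∧
        (pvMergeR (y :: rest)).head? = some (y ++ "-" ++ z)) := by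
  rw [pvMergeR]
  by_cases hc : (y = "Sph" ∨ y = "Sphe") ∧
      ((pvMergeR rest).head? = some "L" ∨ (pvMergeR rest).head? = some "R")
  · rw [if_pos hc]
    rcases hc.2 with h | h
    · exact Or.inr ⟨"L", hc.1, Or.inl rfl, by simp [h]⟩
    · exact Or.inr ⟨"R", hc.1, Or.inr rfl, by simp [h]⟩
  · rw [if_neg hc]; exact Or.inl rfl

-- A's lookahead loop computes the right-fold merge.
theorem pvLoopA_eq_pvMergeR : ∀ parts, pvLoopA parts = pvMergeR parts := by
  intro parts
  induction parts using pvLoopA.induct with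
  | case1 => rfl
  | case2 x y rest' hcond ih =>
      have hyS : y ≠ "Sph" ∧ y ≠ "Sphe" := by
        rcases hcond.2 with h | h <;> subst h <;> exact ⟨by decide, by decide⟩
      rw [pvLoopA, if_pos hcond, ih]
      rw [pvMergeR, pvMergeR_cons_of_not_sph y rest' hyS.1 hyS.2]
      rw [if_pos ⟨hcond.1, by rcases hcond.2 with h | h <;> simp [h]⟩]
      simp
  | case3 x y rest' hcond ih =>
      have key : pvMergeR (x :: y :: rest') = x :: pvMergeR (y :: rest') := by
        conv_lhs => rw [pvMergeR]
        rw [if_neg]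
        rintro ⟨hx, hh⟩
        rcases pvMergeR_head? y rest' with hhead | ⟨z, hyS, hzLR, hhead⟩
        · apply hcond
          refine ⟨hx, ?_⟩
          rcases hh with h | h <;> rw [hhead] at h <;> simp at h <;> simp [h]
        · rcases hh with h | h <;> rw [hhead] at h <;> simp at h <;>
            (rcases hyS with h1 | h1 <;> rcases hzLR with h2 | h2 <;>
              subst h1 <;> subst h2 <;> revert h <;> decide)
      rw [pvLoopA, if_neg hcond, ih, key]
  | case4 x => simp [pvLoopA, pvMergeR]

-- B's reverse-scan loop is a left fold; it distributes over append.
theorem pvRevLoopB_append (xs ys : List String) : ∀ out,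
    pvRevLoopB out (xs ++ ys) = pvRevLoopB (pvRevLoopB out xs) ys := by
  induction xs with
  | nil => intro out; rfl
  | cons t rest ih =>
      intro out
      rw [List.cons_append, pvRevLoopB, pvRevLoopB]
      by_cases hc : (t = "Sph" ∨ t = "Sphe") ∧ out ≠ [] ∧
          (out.getLast? = some "L" ∨ out.getLast? = some "R")
      · rw [if_pos hc, if_pos hc, ih]
      · rw [if_neg hc, if_neg hc, ih]

-- B's reverse scan produces pvMergeR's result reversed.
theorem pvRevLoopB_eq : ∀ parts : List String,
    pvRevLoopB [] parts.reverse = (pvMergeR parts).reverse := by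
  intro parts
  induction parts with
  | nil => rfl
  | cons p ps ih =>
      rw [List.reverse_cons, pvRevLoopB_append, ih, pvMergeR]
      cases hm : pvMergeR ps with
      | nil =>
          simp [pvRevLoopB]
      | cons y tail =>
          by_cases hc : (p = "Sph" ∨ p = "Sphe") ∧ (y = "L" ∨ y = "R")
          · rw [if_pos ⟨hc.1, by rcases hc.2 with h | h <;> simp [h]⟩, pvRevLoopB]
            have hlast : ((y :: tail).reverse).getLast? = some y := by simp
            rw [if_pos ⟨hc.1, by simp, by rw [hlast]; rcases hc.2 with h | h <;> simp [h]⟩,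
              pvRevLoopB]
            simp
          · have hyc : ¬ ((p = "Sph" ∨ p = "Sphe") ∧
                ((y :: tail : List String).head? = some "L" ∨ (y :: tail : List String).head? = some "R")) := by
              rintro ⟨hp, hh | hh⟩ <;> simp at hh <;> exact hc ⟨hp, by simp [hh]⟩
            rw [if_neg hyc, pvRevLoopB]
            rw [if_neg, pvRevLoopB]
            · simp
            · rintro ⟨hp, -, hl | hl⟩ <;> simp at hl <;> exact hc ⟨hp, by simp [hl]⟩

-- fuel-indexed split loop: the result has ≥ 2 pieces iff a separator was seen or remains.
theorem pvGo_two_le (sep : List Char) (hsep : sep ≠ []) :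
    ∀ (fuel : Nat) (l cur : List Char) (acc : List (List Char)), l.length < fuel →
      (2 ≤ (PySem.Chars.splitOn.go sep fuel l cur acc).length ↔
        (acc ≠ [] ∨ PySem.Chars.isIn sep l = true)) := by
  intro fuel
  induction fuel with
  | zero => intro l cur acc h; omega
  | succ f ih =>
    intro l cur acc h
    cases l with
    | nil =>
        rw [PySem.Chars.splitOn.go.eq_def]
        have hIn : PySem.Chars.isIn sep [] = false := by
          rw [PySem.Chars.isIn_eq_false_iff]
          intro hinf
          exact hsep (List.eq_nil_of_infix_nil hinf)
        simp [hIn]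
        cases acc <;> simp
    | cons c rest =>
        rw [PySem.Chars.splitOn.go.eq_def]
        simp only []
        by_cases hp : sep.isPrefixOf (c :: rest) = true
        · rw [if_pos hp]
          have hlen : (List.drop sep.length (c :: rest)).length < f := by
            have hs1 : 1 ≤ sep.length := by
              cases sep with
              | nil => exact absurd rfl hsep
              | cons a t => simp
            simp
            simp at h
            omega
          rw [ih _ [] _ hlen]
          have hIn : PySem.Chars.isIn sep (c :: rest) = true := by
            rw [← PySem.Chars.exists_prefix_drop_iff_isIn]
            exact ⟨0, List.isPrefixOf_iff_prefix.mp hp⟩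
          simp [hIn]
        · rw [if_neg hp]
          rw [ih _ _ _ (by simp at h ⊢; omega)]
          have hIn : PySem.Chars.isIn sep (c :: rest) = PySem.Chars.isIn sep rest := by
            cases h1 : PySem.Chars.isIn sep (c :: rest) with
            | true =>
                obtain ⟨j, hj⟩ := (PySem.Chars.exists_prefix_drop_iff_isIn sep (c :: rest)).mpr h1
                cases j with
                | zero =>
                    simp at hj
                    exact absurd (List.isPrefixOf_iff_prefix.mpr hj) hp
                | succ k =>
                    have h2 : PySem.Chars.isIn sep rest = true := by
                      rw [← PySem.Chars.exists_prefix_drop_iff_isIn]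
                      exact ⟨k, by simpa using hj⟩
                    rw [h2]
            | false =>
                cases h2 : PySem.Chars.isIn sep rest with
                | false => rfl
                | true =>
                    obtain ⟨k, hk⟩ := (PySem.Chars.exists_prefix_drop_iff_isIn sep rest).mpr h2
                    have h3 : PySem.Chars.isIn sep (c :: rest) = true := by
                      rw [← PySem.Chars.exists_prefix_drop_iff_isIn]
                      exact ⟨k + 1, by simpa using hk⟩
                    rw [h1] at h3
                    exact absurd h3 (by simp)
          rw [hIn]

-- the Str-level guard equivalence used at the top level
theorem pvSplit_guard (name : String) :
    ∃ L, PySem.Str.split? name "_selected_" = some L ∧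
      (2 ≤ L.length ↔ PySem.Str.isIn "_selected_" name = true) := by
  have hmap := PySem.Str.split?_map name "_selected_"
  have hchar : PySem.Chars.split? name.toList "_selected_".toList =
      some (PySem.Chars.splitOn name.toList "_selected_".toList) := by
    rw [PySem.Chars.split?]
    simp
  rw [hchar] at hmap
  obtain ⟨L, hL, hLmap⟩ := Option.map_eq_some_iff.mp hmap
  refine ⟨L, hL, ?_⟩
  have hlen : L.length = (PySem.Chars.splitOn name.toList "_selected_".toList).length := by
    rw [← hLmap, List.length_map]
  rw [hlen, PySem.Str.isIn_eq, PySem.Chars.splitOn]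
  rw [pvGo_two_le "_selected_".toList (by decide) _ _ _ _ (by omega)]
  simp

-- ===== VERDICT (by name: the statement is the Claim_ definition above) =====
theorem parse_channel_names_from_filename_spec : Claim_equal_parse_channel_names_from_filename := by
  intro filename _
  unfold Spec_parse_channel_names_from_filename
  unfold parse_channel_names_from_filename parse_channel_names_from_filename_alt
  obtain ⟨L, hL, hiff⟩ := pvSplit_guard (PySem.Str.replace filename ".set" "")
  rw [hL]
  by_cases h : PySem.Str.isIn "_selected_" (PySem.Str.replace filename ".set" "") = false
  · rw [if_pos h]
    have hlen : ¬ 2 ≤ L.length := fun h2 => by rw [hiff.mp h2] at h; cases h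
    rcases L with _ | ⟨a, _ | ⟨b, t⟩⟩
    · rfl
    · rfl
    · exact absurd (by simp) hlen
  · rw [if_neg h]
    have h2 : 2 ≤ L.length := hiff.mpr (by
      revert h
      cases PySem.Str.isIn "_selected_" (PySem.Str.replace filename ".set" "") <;> simp)
    rcases L with _ | ⟨a, _ | ⟨b, t⟩⟩
    · simp at h2
    · simp at h2
    · simp only [Option.getD_some]
      have hget : PySem.List.pyGet? (a :: b :: t) 1 = some b := by
        simp [PySem.List.pyGet?, PySem.List.pyIdx?]
      rw [hL, Option.getD_some, hget, Option.getD_some, pvRevLoopB_eq, List.reverse_reverse,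
        pvLoopA_eq_pvMergeR]
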